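-- pv_equiv track=rewrite | github.com/Mekdeskebede/competitive-programming | A_String_Building.py | solve
-- ===== SOURCE A (Python) =====
-- def solve(s):
--     count = 0
--     i = 0
--     while i < len(s):
--         j = i + 1
--         while j < len(s) and s[j] == s[i]:
--             j += 1
--         if j - i < 2:
--             return "NO"
--         i = j
--     return "YES"
-- ===== SOURCE B (Python) =====
-- def solve(s):
--     runs = []
--     for c in s:
--         if runs and runs[-1][0] == c:
--             runs[-1] = (c, runs[-1][1] + 1)
--         else:
--             runs.append((c, 1))
--     return "YES" if all(k >= 2 for _, k in runs) else "NO"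
-- ===== Notes on version B (the rewrite author's own statement) =====
-- stated objective: alternative
-- what changed: B builds a run-length encoding of the string with a single fold and then checks all run lengths are >= 2, instead of A's nested while loops with explicit i/j run-boundary pointers and early return.
import Mathlib
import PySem

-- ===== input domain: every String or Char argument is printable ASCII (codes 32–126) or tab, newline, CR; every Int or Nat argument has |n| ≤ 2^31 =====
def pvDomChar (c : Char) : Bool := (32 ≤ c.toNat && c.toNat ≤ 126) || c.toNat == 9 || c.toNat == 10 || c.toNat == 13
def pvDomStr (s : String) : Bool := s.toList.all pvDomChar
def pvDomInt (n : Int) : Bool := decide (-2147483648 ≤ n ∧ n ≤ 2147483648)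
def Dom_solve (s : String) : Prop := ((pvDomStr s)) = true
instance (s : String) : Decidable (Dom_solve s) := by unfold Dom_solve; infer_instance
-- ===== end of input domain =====

-- B replaces A's nested while loops (i/j run-boundary pointers, early return) by a
-- run-length encoding built with one fold followed by a check that all runs have length ≥ 2.


-- ===== PORT A =====
-- inner while loop of A: number of leading characters of the list equal to c (= j - i - 1)
def countRun (c : Char) : List Char → Nat
  | [] => 0
  | x :: xs => if x == c then 1 + countRun c xs else 0

-- outer while loop of A: at position i with character c, the run has length countRun c rest + 1
def solveGo : List Char → String
  | [] => "YES"
  | c :: rest =>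
    let k := countRun c rest
    if k + 1 < 2 then "NO" else solveGo (rest.drop k)
termination_by l => l.length
decreasing_by
  simp only [List.length_cons, List.length_drop]
  omega

def solve (s : String) : String := solveGo s.toList

-- ===== PORT B =====
-- one step of B's fold; the accumulator holds the runs in reverse order
-- (Python updates/appends at the END of `runs`; here at the head)
def rleStep (acc : List (Char × Nat)) (c : Char) : List (Char × Nat) :=
  match acc with
  | [] => [(c, 1)]
  | (d, k) :: t => if d == c then (d, k + 1) :: t else (c, 1) :: (d, k) :: t

def solve_alt (s : String) : String :=
  let runs := (s.toList.foldl rleStep []).reverse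
  if runs.all (fun p => 2 ≤ p.2) then "YES" else "NO"

-- ===== PRECONDITION & SPEC =====
def Spec_solve (s : String) (out : String) : Prop := out = solve_alt s
instance (s : String) (out : String) : Decidable (Spec_solve s out) := by unfold Spec_solve; infer_instance

-- ===== CLAIM (what is proved, stated in full; the proofs are below) =====
def Claim_equal_solve : Prop := ∀ (s : String), Dom_solve s → Spec_solve s (solve s)

-- ===== LEMMAS AND PROOFS =====

-- recursive reference form of the run-length encoding, used only in the proofs
def rleFrom (d : Char) (k : Nat) : List Char → List (Char × Nat)
  | [] => [(d, k)]
  | c :: t => if c == d then rleFrom d (k + 1) t else (d, k) :: rleFrom c 1 t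

def rleOf : List Char → List (Char × Nat)
  | [] => []
  | c :: t => rleFrom c 1 t

theorem foldl_rleStep (l : List Char) (d : Char) (k : Nat) (acc : List (Char × Nat)) :
    List.foldl rleStep ((d, k) :: acc) l = (rleFrom d k l).reverse ++ acc := by
  induction l generalizing d k acc with
  | nil => simp [rleFrom]
  | cons c t ih =>
    simp only [List.foldl_cons, rleStep, rleFrom]
    by_cases h : c = d
    · subst h; simp [ih]
    · have h1 : (d == c) = false := by simp [BEq.beq]; exact fun e => h e.symm
      have h2 : (c == d) = false := by simp [BEq.beq]; exact h
      simp [h1, h2, ih]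

theorem rleFrom_countRun (t : List Char) (d : Char) (k : Nat) :
    rleFrom d k t = (d, k + countRun d t) :: rleOf (t.drop (countRun d t)) := by
  induction t generalizing d k with
  | nil => simp [rleFrom, countRun, rleOf]
  | cons c t ih =>
    by_cases h : c = d
    · subst h
      have hc : countRun c (c :: t) = 1 + countRun c t := by simp [countRun]
      have hd : rleFrom c k (c :: t) = rleFrom c (k + 1) t := by simp [rleFrom]
      have he : (c :: t).drop (1 + countRun c t) = t.drop (countRun c t) := by
        rw [Nat.add_comm]; rfl
      rw [hd, ih, hc, he, Nat.add_assoc]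
    · have h2 : (c == d) = false := by simp [BEq.beq]; exact h
      simp [rleFrom, countRun, h2, rleOf]

theorem solveGo_eq_rle (l : List Char) :
    solveGo l = if (rleOf l).all (fun p => 2 ≤ p.2) then "YES" else "NO" := by
  induction l using solveGo.induct with
  | case1 => simp [solveGo, rleOf]
  | case2 c rest k hk =>
    -- k + 1 < 2, i.e. the run at the head has length 1
    have hO : rleOf (c :: rest) = (c, 1 + countRun c rest) :: rleOf (rest.drop (countRun c rest)) := by
      rw [rleOf, rleFrom_countRun]
    rw [solveGo, hO]
    rw [if_pos hk]
    have : ¬ (2 ≤ 1 + countRun c rest) := by omega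
    simp [List.all_cons, this]
  | case3 c rest k hk ih =>
    have hO : rleOf (c :: rest) = (c, 1 + countRun c rest) :: rleOf (rest.drop (countRun c rest)) := by
      rw [rleOf, rleFrom_countRun]
    rw [solveGo, hO]
    rw [if_neg hk]
    have h2 : (2 ≤ 1 + countRun c rest) := by omega
    rw [ih]
    simp only [List.all_cons, h2, decide_true, Bool.true_and]
    rfl

-- ===== VERDICT (by name: the statement is the Claim_ definition above) =====
theorem solve_spec : Claim_equal_solve := by
  unfold Claim_equal_solve
  intro s _
  unfold Spec_solve solve solve_alt
  cases hl : s.toList with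
  | nil => simp [solveGo]
  | cons c t =>
    rw [solveGo_eq_rle]
    have h : List.foldl rleStep [(c, 1)] t = (rleFrom c 1 t).reverse := by
      rw [foldl_rleStep, List.append_nil]
    simp only [List.foldl_cons, rleStep, h, List.all_reverse]
    rfl
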